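-- pv_equiv track=rewrite | github.com/jheon735/TIL | 자료구조알고리즘/DynamicProgramming_N.py | solution
-- ===== SOURCE A (Python) =====
-- def solution(N, number):
--     sets = [set() for i in range(8)]
--     for i, x in enumerate(sets, start=1):
--         x.add(int(str(N) * i))
--     for i in range(1, len(sets)):
--         for j in range(i):
--             for op1 in sets[j]:
--                 for op2 in sets[i - j - 1]:
--                     sets[i].add(op1 + op2)
--                     sets[i].add(op1 - op2)
--                     sets[i].add(op1 * op2)
--                     if op2 != 0:
--                         sets[i].add(op1 // op2)
--         if number in sets[i]:
--             answer = i + 1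
--             break
--     else:
--         answer = -1
--
--     return answer
-- ===== SOURCE B (Python) =====
-- def solution(N, number):
--     # one copy of N can only form N itself, so that case is answered directly
--     if number == N:
--         return 1
--     memo = {1: {int(str(N))}}
--
--     def dp(count):
--         # set of all values expressible with exactly `count` copies of N
--         if count not in memo:
--             vals = {int(str(N) * count)}
--             for a in range(1, count):
--                 for x in dp(a):
--                     for y in dp(count - a):
--                         vals.add(x + y)
--                         vals.add(x - y)
--                         vals.add(x * y)
--                         if y != 0:
--                             vals.add(x // y)
--             memo[count] = vals
--         return memo[count]
--
--     for count in range(2, 9):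
--         if number in dp(count):
--             return count
--     return -1
-- ===== Notes on version B (the rewrite author's own statement) =====
-- stated objective: alternative
-- what changed: Replaces A's bottom-up fixed 8-slot array of sets with in-place mutation and a for-else break by a direct answer for the one-copy case plus top-down memoized recursion dp(count) over the copy count, searching counts 2..8 for the first hit.
-- intended difference: When number == N, A never checks the one-copy set, so it returns 2..8 (e.g. 3 for N=5) or -1; B returns 1, the intended minimal number of copies of N needed to form number. — e.g. on solution(5, 5): A returns 3, B returns 1
import Mathlib
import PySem

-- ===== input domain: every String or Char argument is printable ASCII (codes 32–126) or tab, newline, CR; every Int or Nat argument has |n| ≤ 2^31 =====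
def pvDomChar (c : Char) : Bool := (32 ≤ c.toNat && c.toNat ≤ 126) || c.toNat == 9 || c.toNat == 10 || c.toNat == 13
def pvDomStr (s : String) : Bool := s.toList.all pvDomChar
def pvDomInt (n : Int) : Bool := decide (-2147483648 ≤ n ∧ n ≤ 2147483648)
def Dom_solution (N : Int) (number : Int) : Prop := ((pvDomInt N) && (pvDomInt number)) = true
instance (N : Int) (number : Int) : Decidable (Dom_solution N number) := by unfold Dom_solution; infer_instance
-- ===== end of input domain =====

-- B replaces A's bottom-up 8-slot array with for-else break by a direct answer for one
-- copy plus top-down memoized recursion dp(count), searched for the first hit (objective: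
-- alternative decomposition); B intentionally returns 1 when number == N (see D_ below).

-- ===== PORT A =====
-- int(str(N) * i); the `.getD 0` branch is unreachable under Pre_solution (0 ≤ N, so parsing succeeds)
def pyConcat (N : Int) (i : Nat) : Int :=
  (PySem.Int.ofChars? (List.flatten (List.replicate i (PySem.Int.toChars N)))).getD 0

-- the four adds of the innermost loop body (shared verbatim by both Pythons)
def addOps (acc : PySem.Set Int) (op1 op2 : Int) : PySem.Set Int :=
  let acc1 := PySem.Set.add acc (op1 + op2)
  let acc2 := PySem.Set.add acc1 (op1 - op2)
  let acc3 := PySem.Set.add acc2 (op1 * op2)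
  if op2 ≠ 0 then PySem.Set.add acc3 (PySem.Int.floordiv op1 op2) else acc3

-- the j/op1/op2 triple loop filling sets[i]
def combineA (sets : List (PySem.Set Int)) (i : Nat) : PySem.Set Int :=
  (List.range i).foldl (fun acc j =>
    (sets.getD j PySem.Set.empty).foldl (fun acc op1 =>
      (sets.getD (i - j - 1) PySem.Set.empty).foldl (fun acc op2 =>
        addOps acc op1 op2) acc) acc)
    (sets.getD i PySem.Set.empty)

-- the outer `for i in range(1, len(sets)) … else` loop with its break
def loopA (number : Int) : List Nat → List (PySem.Set Int) → Int
  | [], _ => -1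
  | i :: rest, sets =>
    let si := combineA sets i
    if PySem.Set.contains si number then (i : Int) + 1
    else loopA number rest (sets.set i si)

def solution (N : Int) (number : Int) : Int :=
  loopA number (List.range' 1 7)
    ((List.range 8).map (fun k => PySem.Set.add PySem.Set.empty (pyConcat N (k + 1))))

-- ===== PORT B =====
-- one dp(count) level computed from the memo of all smaller counts
def dpLevel (N : Int) (memo : List (PySem.Set Int)) (c : Nat) : PySem.Set Int :=
  (List.range' 1 (c - 1)).foldl (fun acc a =>
    (memo.getD (a - 1) PySem.Set.empty).foldl (fun acc x =>
      (memo.getD (c - a - 1) PySem.Set.empty).foldl (fun acc y =>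
        addOps acc x y) acc) acc)
    (PySem.Set.add PySem.Set.empty (pyConcat N c))

-- the `for count in range(2, 9)` search; memo grows by one level per dp call
def searchB (N number : Int) : List Nat → List (PySem.Set Int) → Int
  | [], _ => -1
  | c :: rest, memo =>
    let v := dpLevel N memo c
    if PySem.Set.contains v number then (c : Int)
    else searchB N number rest (memo ++ [v])

def solution_alt (N : Int) (number : Int) : Int :=
  if number = N then 1
  else searchB N number (List.range' 2 7) [PySem.Set.add PySem.Set.empty (pyConcat N 1)]

-- ===== PRECONDITION & SPEC =====
-- Pre_ excludes N < 0, where A raises ValueError: int(str(N)*i) fails for i ≥ 2 ('-3-3')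
def Pre_solution (N : Int) (number : Int) : Prop := 0 ≤ N
instance (N : Int) (number : Int) : Decidable (Pre_solution N number) := by unfold Pre_solution; infer_instance
def pvWitness_solution : Int × Int := (2, 4)

-- When number == N the intended answer is 1 (one copy of N suffices), but A only ever
-- checks 2..8 copies and returns 2..8 or -1 there; B returns the intended 1.
def D_solution (N : Int) (number : Int) : Prop := number = N
instance (N : Int) (number : Int) : Decidable (D_solution N number) := by unfold D_solution; infer_instance

def Spec_solution (N : Int) (number : Int) (out : Int) : Prop := ¬ D_solution N number → out = solution_alt N number
instance (N : Int) (number : Int) (out : Int) : Decidable (Spec_solution N number out) := by unfold Spec_solution; infer_instance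

def pvDiffWitness_solution : Int × Int := (5, 5)
def pvDiffWitnessOut_solution : Int × Int := (3, 1)

-- ===== CLAIM (what is proved, stated in full; the proofs are below) =====
def Claim_unchanged_solution : Prop := ∀ (N : Int) (number : Int), Dom_solution N number → Pre_solution N number → Spec_solution N number (solution N number)
def Claim_changed_solution : Prop := Dom_solution (pvDiffWitness_solution.1) (pvDiffWitness_solution.2) ∧ Pre_solution (pvDiffWitness_solution.1) (pvDiffWitness_solution.2) ∧ D_solution (pvDiffWitness_solution.1) (pvDiffWitness_solution.2) ∧ solution (pvDiffWitness_solution.1) (pvDiffWitness_solution.2) = pvDiffWitnessOut_solution.1 ∧ solution_alt (pvDiffWitness_solution.1) (pvDiffWitness_solution.2) = pvDiffWitnessOut_solution.2 ∧ pvDiffWitnessOut_solution.1 ≠ pvDiffWitnessOut_solution.2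
def Claim_exact_solution : Prop := ∀ (N : Int) (number : Int), Dom_solution N number → Pre_solution N number → D_solution N number → solution N number ≠ solution_alt N number

-- ===== LEMMAS AND PROOFS =====

-- A's triple loop at slot k computes exactly B's dp level for count k+1,
-- provided the memo agrees with sets[0..k-1] and sets[k] is still the bare concatenation.
lemma combineA_eq_dpLevel (N : Int) (sets memo : List (PySem.Set Int)) (k : Nat)
    (hpref : ∀ j < k, memo.getD j PySem.Set.empty = sets.getD j PySem.Set.empty)
    (hk : sets.getD k PySem.Set.empty = PySem.Set.add PySem.Set.empty (pyConcat N (k + 1))) :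
    combineA sets k = dpLevel N memo (k + 1) := by
  unfold combineA dpLevel
  rw [hk]
  simp only [Nat.add_sub_cancel, List.range'_eq_map_range, List.foldl_map]
  apply PySem.List.foldl_congr_mem
  intro acc j hj
  have hjk : j < k := List.mem_range.mp hj
  have h1 : 1 + j - 1 = j := by omega
  have h2 : k + 1 - (1 + j) - 1 = k - j - 1 := by omega
  rw [h1, h2, hpref j hjk, hpref (k - j - 1) (by omega)]

lemma loopA_eq_searchB (N number : Int) :
    ∀ (n k : Nat) (sets memo : List (PySem.Set Int)),
    sets.length = 8 → memo.length = k → k + n ≤ 8 →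
    (∀ j < k, memo.getD j PySem.Set.empty = sets.getD j PySem.Set.empty) →
    (∀ j, k ≤ j → j < 8 → sets.getD j PySem.Set.empty = PySem.Set.add PySem.Set.empty (pyConcat N (j + 1))) →
    loopA number (List.range' k n) sets = searchB N number (List.range' (k + 1) n) memo := by
  intro n
  induction n with
  | zero => intro k sets memo _ _ _ _ _; rfl
  | succ n ih =>
    intro k sets memo hs hm hn hpref hsuf
    rw [List.range'_succ, List.range'_succ]
    show (let si := combineA sets k
          if PySem.Set.contains si number then (k : Int) + 1
          else loopA number (List.range' (k + 1) n) (sets.set k si)) =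
         (let v := dpLevel N memo (k + 1)
          if PySem.Set.contains v number then ((k + 1 : Nat) : Int)
          else searchB N number (List.range' (k + 1 + 1) n) (memo ++ [v]))
    have hcomb : combineA sets k = dpLevel N memo (k + 1) :=
      combineA_eq_dpLevel N sets memo k hpref (hsuf k le_rfl (by omega))
    simp only [hcomb, PySem.Set.contains_iff]
    by_cases hmem : number ∈ dpLevel N memo (k + 1)
    · simp [hmem]
    · simp only [hmem, if_false]
      apply ih (k + 1)
      · simp [hs]
      · simp [hm]
      · omega
      · intro j hj
        by_cases hjk : j < k
        · rw [List.getD_append _ _ _ _ (by omega), hpref j hjk]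
          simp [List.getD, List.getElem?_set_ne (show k ≠ j by omega)]
        · have hjeq : j = k := by omega
          subst hjeq
          have h1 : (memo ++ [dpLevel N memo (j + 1)]).getD j PySem.Set.empty
              = dpLevel N memo (j + 1) := by
            rw [← hm]; simp [List.getD]
          have h2 : (sets.set j (dpLevel N memo (j + 1))).getD j PySem.Set.empty
              = dpLevel N memo (j + 1) := by
            simp [List.getD, (by omega : j < sets.length)]
          rw [h1, h2]
      · intro j hj hj8
        rw [show (sets.set k (dpLevel N memo (k + 1))).getD j PySem.Set.empty
              = sets.getD j PySem.Set.empty by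
            simp [List.getD, List.getElem?_set_ne (show k ≠ j by omega)]]
        exact hsuf j (by omega) hj8

-- A's loop over indices ≥ 1 never returns 1 (its answers are -1 or i+1 ≥ 2)
lemma loopA_ne_one (number : Int) :
    ∀ (l : List Nat) (sets : List (PySem.Set Int)), (∀ i ∈ l, 1 ≤ i) → loopA number l sets ≠ 1 := by
  intro l
  induction l with
  | nil => intro sets _; simp [loopA]
  | cons i rest ih =>
    intro sets hpos
    show (let si := combineA sets i
          if PySem.Set.contains si number then (i : Int) + 1
          else loopA number rest (sets.set i si)) ≠ 1
    by_cases hmem : PySem.Set.contains (combineA sets i) number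
    · simp only [hmem, if_true]
      have : 1 ≤ i := hpos i (List.mem_cons_self ..)
      intro h; omega
    · simp only [hmem, Bool.false_eq_true, if_false]
      exact ih _ (fun j hj => hpos j (List.mem_cons_of_mem _ hj))

-- ===== VERDICT (by name: the statement is the Claim_ definition above) =====
theorem solution_spec : Claim_unchanged_solution := by
  intro N number _ _ hD
  unfold solution solution_alt
  rw [if_neg (show ¬ number = N from hD)]
  have := loopA_eq_searchB N number 7 1
    ((List.range 8).map (fun k => PySem.Set.add PySem.Set.empty (pyConcat N (k + 1))))
    [PySem.Set.add PySem.Set.empty (pyConcat N 1)]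
    (by simp) (by simp) (by omega)
    (by intro j hj
        interval_cases j
        simp [List.getD])
    (by intro j _ hj8
        interval_cases j <;> simp [List.getD])
  exact this

set_option maxRecDepth 40000 in
theorem solution_changed : Claim_changed_solution := by
  unfold Claim_changed_solution; decide

theorem solution_tight : Claim_exact_solution := by
  intro N number _ _ hD
  unfold solution solution_alt
  rw [if_pos (show number = N from hD)]
  apply loopA_ne_one
  intro i hi
  have := List.mem_range'_1.mp hi
  omega
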